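-- pv_equiv track=rewrite | github.com/TongshuWu1/Tony_Swarm | Knot/Scripts/cartesian_GUI_fix.py | split_into_sections_by_agents
-- ===== SOURCE A (Python) =====
-- def split_into_sections_by_agents(path_list, agent_points):
--     sections = []
--     current_section = []
--
--     for point in path_list:
--         current_section.append(point)
--         if point[:2] in agent_points and len(current_section) > 1:
--             sections.append(current_section)
--             current_section = [point]  # Start new section with this agent
--
--     if len(current_section) > 1:
--         sections.append(current_section)
--
--     return sections
-- ===== SOURCE B (Python) =====
-- def split_into_sections_by_agents(path_list, agent_points):
--     # Two passes: first collect the cut indices (an agent point at i >= 1 ends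
--     # a section and starts the next), then slice the path between consecutive
--     # boundaries; no accumulate-and-reset state.
--     cut = [i for i, p in enumerate(path_list) if i > 0 and p[:2] in agent_points]
--     sections = []
--     prev = 0
--     for c in cut:
--         sections.append(path_list[prev:c + 1])
--         prev = c
--     tail = path_list[prev:]
--     if len(tail) > 1:
--         sections.append(tail)
--     return sections
-- ===== Notes on version B (the rewrite author's own statement) =====
-- stated objective: alternative
-- what changed: Replaces A's accumulate-and-reset loop state with two passes: first collect the cut indices (agent points at index >= 1), then slice the path between consecutive boundaries.
import Mathlib
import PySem

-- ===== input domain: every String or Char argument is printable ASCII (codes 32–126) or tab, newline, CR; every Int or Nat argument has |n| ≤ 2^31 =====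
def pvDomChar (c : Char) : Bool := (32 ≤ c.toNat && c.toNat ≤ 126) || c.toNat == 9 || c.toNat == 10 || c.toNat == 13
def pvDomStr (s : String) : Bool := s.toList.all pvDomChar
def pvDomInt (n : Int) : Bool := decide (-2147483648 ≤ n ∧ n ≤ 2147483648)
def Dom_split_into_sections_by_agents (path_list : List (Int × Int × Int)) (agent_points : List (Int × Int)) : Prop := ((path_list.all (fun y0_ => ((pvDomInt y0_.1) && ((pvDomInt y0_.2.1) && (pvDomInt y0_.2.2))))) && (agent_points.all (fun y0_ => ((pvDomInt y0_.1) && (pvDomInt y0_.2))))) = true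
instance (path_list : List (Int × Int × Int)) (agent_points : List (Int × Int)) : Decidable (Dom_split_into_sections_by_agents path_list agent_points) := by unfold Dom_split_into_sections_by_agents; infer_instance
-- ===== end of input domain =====

-- B replaces A's accumulate-and-reset loop state with two passes (cut indices, then slices); alternative decomposition, same cost.

-- ===== PORT A =====
def split_into_sections_by_agents (path_list : List (Int × Int × Int)) (agent_points : List (Int × Int)) : List (List (Int × Int × Int)) :=
  let st := path_list.foldl
    (fun (st : List (List (Int × Int × Int)) × List (Int × Int × Int)) point =>
      let cur := st.2 ++ [point]
      if (point.1, point.2.1) ∈ agent_points ∧ cur.length > 1 then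
        (st.1 ++ [cur], [point])
      else
        (st.1, cur))
    ([], [])
  if st.2.length > 1 then st.1 ++ [st.2] else st.1

-- ===== PORT B =====
def split_into_sections_by_agents_alt (path_list : List (Int × Int × Int)) (agent_points : List (Int × Int)) : List (List (Int × Int × Int)) :=
  let cut := ((PySem.List.enumerate path_list 0).filter
      (fun ip => decide (0 < ip.1) && decide ((ip.2.1, ip.2.2.1) ∈ agent_points))).map (·.1)
  let st := cut.foldl
    (fun (st : List (List (Int × Int × Int)) × Int) c =>
      (st.1 ++ [PySem.List.slice path_list (some st.2) (some (c + 1))], c))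
    ([], 0)
  let tail := PySem.List.slice path_list (some st.2) none
  if tail.length > 1 then st.1 ++ [tail] else st.1

-- ===== PRECONDITION & SPEC =====
def Spec_split_into_sections_by_agents (path_list : List (Int × Int × Int)) (agent_points : List (Int × Int)) (out : List (List (Int × Int × Int))) : Prop := out = split_into_sections_by_agents_alt path_list agent_points
instance (path_list : List (Int × Int × Int)) (agent_points : List (Int × Int)) (out : List (List (Int × Int × Int))) : Decidable (Spec_split_into_sections_by_agents path_list agent_points out) := by unfold Spec_split_into_sections_by_agents; infer_instance

-- ===== CLAIM (what is proved, stated in full; the proofs are below) =====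
def Claim_equal_split_into_sections_by_agents : Prop := ∀ (path_list : List (Int × Int × Int)) (agent_points : List (Int × Int)), Dom_split_into_sections_by_agents path_list agent_points → Spec_split_into_sections_by_agents path_list agent_points (split_into_sections_by_agents path_list agent_points)

-- ===== LEMMAS AND PROOFS =====

-- A point that counts as an agent boundary.
def pvAgent (agent_points : List (Int × Int)) (p : Int × Int × Int) : Bool :=
  decide ((p.1, p.2.1) ∈ agent_points)

-- Recursive form of A's loop: current section `c`, remaining points.
def pvGoA (ap : List (Int × Int)) (c : List (Int × Int × Int)) :
    List (Int × Int × Int) → List (List (Int × Int × Int))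
  | [] => if c.length > 1 then [c] else []
  | p :: l =>
    if (p.1, p.2.1) ∈ ap ∧ (c ++ [p]).length > 1 then
      (c ++ [p]) :: pvGoA ap [p] l
    else
      pvGoA ap (c ++ [p]) l

-- Common index-scanning form: `t` is the remaining path starting at the current
-- section, whose first `m` points are already in the current section.
def pvScan (ap : List (Int × Int)) (t : List (Int × Int × Int)) (m : Nat) :
    List (List (Int × Int × Int)) :=
  if h : t.length ≤ m then (if t.length > 1 then [t] else [])
  else if pvAgent ap (t.getD m (0, 0, 0)) then
    t.take (m + 1) :: pvScan ap (t.drop m) 1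
  else
    pvScan ap t (m + 1)
termination_by t.length - m
decreasing_by
  · simp only [List.length_drop]; omega
  · omega

-- Recursive form of B's boundary walk over absolute cut indices.
def pvBuild (path : List (Int × Int × Int)) (prev : Nat) :
    List Nat → List (List (Int × Int × Int))
  | [] => if (path.drop prev).length > 1 then [path.drop prev] else []
  | j :: js => (path.drop prev).take (j + 1 - prev) :: pvBuild path j js

-- cut predicate over absolute indices
def pvCutP (ap : List (Int × Int)) (path : List (Int × Int × Int)) (i : Nat) : Bool :=
  decide (1 ≤ i) && pvAgent ap (path.getD i (0, 0, 0))

lemma pvA_fold (ap : List (Int × Int)) :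
    ∀ (l : List (Int × Int × Int)) (s : List (List (Int × Int × Int))) (c : List (Int × Int × Int)),
      (let st := l.foldl
        (fun (st : List (List (Int × Int × Int)) × List (Int × Int × Int)) point =>
          let cur := st.2 ++ [point]
          if (point.1, point.2.1) ∈ ap ∧ cur.length > 1 then (st.1 ++ [cur], [point])
          else (st.1, cur)) (s, c)
       ; if st.2.length > 1 then st.1 ++ [st.2] else st.1) = s ++ pvGoA ap c l := by
  intro l
  induction l with
  | nil =>
    intro s c
    simp only [List.foldl_nil, pvGoA]
    split_ifs <;> simp
  | cons p l ih =>
    intro s c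
    simp only [List.foldl_cons]
    by_cases hc : (p.1, p.2.1) ∈ ap ∧ (c ++ [p]).length > 1
    · simp only [pvGoA, if_pos hc]
      have := ih (s ++ [c ++ [p]]) [p]
      simp only at this ⊢
      rw [this, List.append_assoc]
      rfl
    · simp only [pvGoA, if_neg hc]
      have := ih s (c ++ [p])
      simp only at this ⊢
      exact this

lemma pvGoA_eq_scan (ap : List (Int × Int)) :
    ∀ (l c : List (Int × Int × Int)), c ≠ [] →
      pvGoA ap c l = pvScan ap (c ++ l) c.length := by
  intro l
  induction l with
  | nil =>
    intro c hc
    rw [pvScan]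
    simp [pvGoA]
  | cons p l ih =>
    intro c hc
    have hlen : 1 ≤ c.length := List.length_pos_iff.mpr hc
    have hget : (c ++ p :: l).getD c.length (0, 0, 0) = p := by
      rw [List.getD_eq_getElem?_getD, List.getElem?_append_right (le_refl _)]
      simp
    have htake : (c ++ p :: l).take (c.length + 1) = c ++ [p] := by
      rw [List.take_append]
      simp
    have hdrop : (c ++ p :: l).drop c.length = p :: l := by
      rw [List.drop_append]
      simp
    rw [pvScan, dif_neg (by simp)]
    rw [hget]
    by_cases ha : (p.1, p.2.1) ∈ ap
    · have hA : pvAgent ap p = true := by simp [pvAgent, ha]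
      rw [if_pos hA, htake, hdrop]
      simp only [pvGoA]
      have hcond : (p.1, p.2.1) ∈ ap ∧ (c ++ [p]).length > 1 := ⟨ha, by simp; omega⟩
      rw [if_pos hcond]
      have := ih [p] (by simp)
      simpa using this
    · have hA : pvAgent ap p = false := by simp [pvAgent, ha]
      rw [if_neg (by simp [hA])]
      simp only [pvGoA]
      rw [if_neg (by simp [ha])]
      have := ih (c ++ [p]) (by simp)
      simpa [List.append_assoc] using this

lemma pvFilter_split (q : Nat → Bool) :
    ∀ (n a : Nat), a < n → q a = true →
      (List.range n).filter (fun i => q i && decide (a ≤ i)) =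
        a :: (List.range n).filter (fun i => q i && decide (a + 1 ≤ i)) := by
  intro n
  induction n with
  | zero => omega
  | succ n ih =>
    intro a ha hq
    rw [List.range_succ, List.filter_append, List.filter_append]
    by_cases h : a < n
    · rw [ih a h hq]
      have : ∀ i ∈ [n], (q i && decide (a ≤ i)) = (q i && decide (a + 1 ≤ i)) := by
        intro i hi
        simp only [List.mem_singleton] at hi
        subst hi
        congr 1
        rw [decide_eq_decide]
        omega
      rw [List.filter_congr this]
      simp
    · have han : a = n := by omega
      subst han
      have h1 : (List.range a).filter (fun i => q i && decide (a ≤ i)) = [] := by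
        rw [List.filter_eq_nil_iff]
        intro i hi
        simp only [List.mem_range] at hi
        simp
        omega
      have h2 : (List.range a).filter (fun i => q i && decide (a + 1 ≤ i)) = [] := by
        rw [List.filter_eq_nil_iff]
        intro i hi
        simp only [List.mem_range] at hi
        simp
        omega
      rw [h1, h2]
      simp [hq]

lemma pvFilter_congr (q : Nat → Bool) (n a : Nat) (hq : q a = false) :
    (List.range n).filter (fun i => q i && decide (a ≤ i)) =
      (List.range n).filter (fun i => q i && decide (a + 1 ≤ i)) := by
  apply List.filter_congr
  intro i _
  by_cases h : i = a
  · subst h; simp [hq]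
  · congr 1
    rw [decide_eq_decide]
    omega

lemma pvScan_build_base (ap : List (Int × Int)) (path : List (Int × Int × Int))
    (prev m : Nat) (hn : path.length ≤ prev + m) :
    pvScan ap (path.drop prev) m =
      pvBuild path prev
        ((List.range path.length).filter (fun i => pvCutP ap path i && decide (prev + m ≤ i))) := by
  have hfil : (List.range path.length).filter
      (fun i => pvCutP ap path i && decide (prev + m ≤ i)) = [] := by
    rw [List.filter_eq_nil_iff]
    intro i hi
    simp only [List.mem_range] at hi
    simp
    omega
  rw [hfil, pvScan, dif_pos (by simp; omega)]
  rfl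

lemma pvScan_eq_build (ap : List (Int × Int)) (path : List (Int × Int × Int)) :
    ∀ (k prev m : Nat), path.length - (prev + m) ≤ k → 1 ≤ m →
      pvScan ap (path.drop prev) m =
        pvBuild path prev
          ((List.range path.length).filter (fun i => pvCutP ap path i && decide (prev + m ≤ i))) := by
  intro k
  induction k with
  | zero =>
    intro prev m hk _
    exact pvScan_build_base ap path prev m (by omega)
  | succ k ih =>
    intro prev m hk hm
    by_cases hn : path.length ≤ prev + m
    · exact pvScan_build_base ap path prev m hn
    · rw [not_le] at hn
      have hget : (path.drop prev).getD m (0, 0, 0) = path.getD (prev + m) (0, 0, 0) := by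
        rw [List.getD_eq_getElem?_getD, List.getD_eq_getElem?_getD, List.getElem?_drop]
      rw [pvScan, dif_neg (by simp; omega), hget]
      by_cases hA : pvAgent ap (path.getD (prev + m) (0, 0, 0)) = true
      · rw [if_pos hA]
        have hq : pvCutP ap path (prev + m) = true := by
          unfold pvCutP
          rw [hA]
          simp
          omega
        rw [pvFilter_split (pvCutP ap path) path.length (prev + m) hn hq]
        have hdd : (path.drop prev).drop m = path.drop (prev + m) := by
          rw [List.drop_drop]
        rw [hdd, ih (prev + m) 1 (by omega) (by omega)]
        simp only [pvBuild]
        have harith : prev + m + 1 - prev = m + 1 := by omega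
        rw [harith]
      · rw [if_neg hA]
        have hq : pvCutP ap path (prev + m) = false := by
          simp only [Bool.not_eq_true] at hA
          unfold pvCutP
          rw [hA]
          simp
        rw [pvFilter_congr (pvCutP ap path) path.length (prev + m) hq]
        have := ih prev (m + 1) (by omega) (by omega)
        rw [this]
        have harith : prev + (m + 1) = prev + m + 1 := by omega
        rw [harith]

lemma pvCut_cast (ap : List (Int × Int)) :
    ∀ (l : List (Int × Int × Int)) (s : Nat),
      ((PySem.List.enumerate l (s : Int)).filter
          (fun ip => decide (0 < ip.1) && decide ((ip.2.1, ip.2.2.1) ∈ ap))).map (·.1) =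
      ((List.range l.length).filter
          (fun k => decide (0 < s + k) && pvAgent ap (l.getD k (0, 0, 0)))).map
        (fun k : Nat => ((s + k : Nat) : Int)) := by
  intro l
  induction l with
  | nil => intro s; simp [PySem.List.enumerate]
  | cons p l ih =>
    intro s
    have hcast : (s : Int) + 1 = ((s + 1 : Nat) : Int) := by push_cast; ring
    rw [PySem.List.enumerate_cons, hcast]
    have hrange : List.range (p :: l).length = 0 :: (List.range l.length).map Nat.succ := by
      simp [List.range_succ_eq_map]
    rw [hrange]
    rw [List.filter_cons, List.filter_cons]
    have htail : ((List.range l.length).map Nat.succ).filter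
        (fun k => decide (0 < s + k) && pvAgent ap ((p :: l).getD k (0, 0, 0))) =
        ((List.range l.length).filter
          (fun k => decide (0 < (s + 1) + k) && pvAgent ap (l.getD k (0, 0, 0)))).map Nat.succ := by
      rw [List.filter_map]
      congr 1
      apply List.filter_congr
      intro k _
      have hsk : s + Nat.succ k = s + 1 + k := by omega
      simp only [Function.comp_apply, List.getD_cons_succ, hsk]
    rw [htail]
    have hfun : ((fun k : Nat => ((s + k : Nat) : Int)) ∘ Nat.succ) =
        (fun k : Nat => ((s + 1 + k : Nat) : Int)) := by
      funext k
      simp only [Function.comp_apply, Nat.succ_eq_add_one]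
      push_cast
      ring
    have hheadeq : (decide (0 < (s : Int)) && decide ((p.1, p.2.1) ∈ ap)) =
        (decide (0 < s + 0) && pvAgent ap ((p :: l).getD 0 (0, 0, 0))) := by
      simp [pvAgent]
    rw [← hheadeq]
    by_cases hs : (decide (0 < (s : Int)) && decide ((p.1, p.2.1) ∈ ap)) = true
    · rw [if_pos hs, if_pos hs]
      simp only [List.map_cons, List.map_map, hfun]
      rw [ih (s + 1)]
      simp
    · rw [if_neg hs, if_neg hs]
      simp only [List.map_map, hfun]
      rw [ih (s + 1)]

lemma pvB_fold (path : List (Int × Int × Int)) :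
    ∀ (js : List Nat) (s : List (List (Int × Int × Int))) (prev : Nat),
      (let st := (js.map (fun n : Nat => (n : Int))).foldl
        (fun (st : List (List (Int × Int × Int)) × Int) c =>
          (st.1 ++ [PySem.List.slice path (some st.2) (some (c + 1))], c)) (s, (prev : Int))
       ; let tail := PySem.List.slice path (some st.2) none
       ; if tail.length > 1 then st.1 ++ [tail] else st.1) = s ++ pvBuild path prev js := by
  intro js
  induction js with
  | nil =>
    intro s prev
    simp only [List.map_nil, List.foldl_nil, PySem.List.slice_from_natCast, pvBuild]
    split_ifs <;> simp
  | cons j js ih =>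
    intro s prev
    simp only [List.map_cons, List.foldl_cons]
    have hsec : PySem.List.slice path (some (prev : Int)) (some ((j : Int) + 1)) =
        (path.drop prev).take (j + 1 - prev) := by
      have : (j : Int) + 1 = ((j + 1 : Nat) : Int) := by push_cast; ring
      rw [this, PySem.List.slice_natCast]
    rw [hsec]
    have := ih (s ++ [(path.drop prev).take (j + 1 - prev)]) j
    simp only at this ⊢
    rw [this, List.append_assoc]
    rfl

-- Bridges from the two ports to the recursive forms, and the final assembly.
lemma pvA_eq (path_list : List (Int × Int × Int)) (agent_points : List (Int × Int)) :
    split_into_sections_by_agents path_list agent_points = pvGoA agent_points [] path_list := by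
  have h := pvA_fold agent_points path_list [] []
  simpa [split_into_sections_by_agents] using h

lemma pvB_eq (path_list : List (Int × Int × Int)) (agent_points : List (Int × Int)) :
    split_into_sections_by_agents_alt path_list agent_points =
      pvBuild path_list 0
        ((List.range path_list.length).filter
          (fun k => decide (0 < k) && pvAgent agent_points (path_list.getD k (0, 0, 0)))) := by
  have hcut := pvCut_cast agent_points path_list 0
  have hfold := pvB_fold path_list
    ((List.range path_list.length).filter
      (fun k => decide (0 < k) && pvAgent agent_points (path_list.getD k (0, 0, 0)))) [] 0
  simp only [Nat.cast_zero, Nat.zero_add] at hcut hfold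
  unfold split_into_sections_by_agents_alt
  rw [hcut]
  simpa using hfold

lemma pvGoA_eq_build (agent_points : List (Int × Int)) (path_list : List (Int × Int × Int)) :
    pvGoA agent_points [] path_list =
      pvBuild path_list 0
        ((List.range path_list.length).filter
          (fun k => decide (0 < k) && pvAgent agent_points (path_list.getD k (0, 0, 0)))) := by
  cases path_list with
  | nil => simp [pvGoA, pvBuild]
  | cons p l =>
    have h1 : pvGoA agent_points [] (p :: l) = pvGoA agent_points [p] l := by
      simp only [pvGoA]
      rw [if_neg (by simp)]
      simp
    have h3 := pvScan_eq_build agent_points (p :: l) (p :: l).length 0 1 (by omega) (by omega)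
    simp only [List.drop_zero] at h3
    have h2 := pvGoA_eq_scan agent_points l [p] (by simp)
    simp only [List.singleton_append, List.length_cons, List.length_nil] at h2
    rw [h1, h2, h3]
    congr 1
    apply List.filter_congr
    intro i _
    unfold pvCutP
    by_cases h : 1 ≤ i
    · have h0 : 0 < i := h
      simp [h, h0]
    · have h0 : ¬ 0 < i := by omega
      simp [h, h0]

-- ===== VERDICT (by name: the statement is the Claim_ definition above) =====
theorem split_into_sections_by_agents_spec : Claim_equal_split_into_sections_by_agents := by
  intro path_list agent_points _
  unfold Spec_split_into_sections_by_agents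
  rw [pvA_eq, pvGoA_eq_build, ← pvB_eq]
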